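-- pv_equiv track=rewrite | github.com/Artamta/Fuxi-Updated-V2 | scripts/generate_publication_report_pack.py | variable_order
-- ===== SOURCE A (Python) =====
-- from typing import Dict, List, Sequence, Tuple
--
-- def variable_order(existing: Sequence[str]) -> List[str]:
--     preferred = [
--         "2m_temperature",
--         "surface_pressure",
--         "10m_u_component_of_wind",
--         "10m_v_component_of_wind",
--         "total_column_water_vapour",
--         "temperature_plev850",
--         "temperature_plev500",
--         "temperature_plev250",
--         "geopotential_plev850",
--         "geopotential_plev500",
--         "geopotential_plev250",
--         "specific_humidity_plev850",
--         "specific_humidity_plev500",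
--         "specific_humidity_plev250",
--         "u_component_of_wind_plev850",
--         "u_component_of_wind_plev500",
--         "u_component_of_wind_plev250",
--         "v_component_of_wind_plev850",
--         "v_component_of_wind_plev500",
--         "v_component_of_wind_plev250",
--     ]
--     seen = set(existing)
--     ordered = [v for v in preferred if v in seen]
--     ordered.extend([v for v in existing if v not in ordered])
--     return ordered
-- ===== SOURCE B (Python) =====
-- def variable_order(existing):
--     preferred = [
--         "2m_temperature",
--         "surface_pressure",
--         "10m_u_component_of_wind",
--         "10m_v_component_of_wind",
--         "total_column_water_vapour",
--         "temperature_plev850",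
--         "temperature_plev500",
--         "temperature_plev250",
--         "geopotential_plev850",
--         "geopotential_plev500",
--         "geopotential_plev250",
--         "specific_humidity_plev850",
--         "specific_humidity_plev500",
--         "specific_humidity_plev250",
--         "u_component_of_wind_plev850",
--         "u_component_of_wind_plev500",
--         "u_component_of_wind_plev250",
--         "v_component_of_wind_plev850",
--         "v_component_of_wind_plev500",
--         "v_component_of_wind_plev250",
--     ]
--     rank = {name: i for i, name in enumerate(preferred)}
--     in_pref = sorted({v for v in existing if v in rank}, key=rank.get)
--     extras = [v for v in existing if v not in rank]
--     return in_pref + extras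
-- ===== Notes on version B (the rewrite author's own statement) =====
-- stated objective: alternative
-- what changed: Instead of scanning the fixed preferred list for membership hits and rescanning it per extra element, B builds a rank table once, sorts the deduplicated preferred hits of the input by rank, and keeps non-preferred items in order.
import Mathlib
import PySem

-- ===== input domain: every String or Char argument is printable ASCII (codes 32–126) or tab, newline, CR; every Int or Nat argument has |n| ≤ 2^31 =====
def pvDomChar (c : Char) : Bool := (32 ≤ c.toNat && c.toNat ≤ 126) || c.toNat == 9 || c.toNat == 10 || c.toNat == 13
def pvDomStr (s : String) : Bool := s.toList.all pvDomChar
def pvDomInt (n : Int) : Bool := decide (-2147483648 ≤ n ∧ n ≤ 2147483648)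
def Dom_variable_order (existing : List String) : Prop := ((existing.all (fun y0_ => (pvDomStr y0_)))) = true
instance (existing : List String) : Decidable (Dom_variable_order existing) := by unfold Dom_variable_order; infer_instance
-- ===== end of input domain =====

-- B replaces A's scan of the fixed preferred list (and per-element rescans of the hit list)
-- by a rank table: dedup the preferred hits of the input and sort them by rank (objective: alternative).

-- the literal 'preferred' list both Python sources contain
def pvPreferred : List String := [
  "2m_temperature",
  "surface_pressure",
  "10m_u_component_of_wind",
  "10m_v_component_of_wind",
  "total_column_water_vapour",
  "temperature_plev850",
  "temperature_plev500",
  "temperature_plev250",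
  "geopotential_plev850",
  "geopotential_plev500",
  "geopotential_plev250",
  "specific_humidity_plev850",
  "specific_humidity_plev500",
  "specific_humidity_plev250",
  "u_component_of_wind_plev850",
  "u_component_of_wind_plev500",
  "u_component_of_wind_plev250",
  "v_component_of_wind_plev850",
  "v_component_of_wind_plev500",
  "v_component_of_wind_plev250"]

-- ===== PORT A =====
def variable_order (existing : List String) : List String :=
  let seen : PySem.Set String := PySem.Set.ofList existing
  let ordered := pvPreferred.filter (fun v => PySem.Set.contains seen v)
  ordered ++ existing.filter (fun v => !(ordered.contains v))

-- ===== PORT B =====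
-- rank = {name: i for i, name in enumerate(preferred)}
def pvRank : PySem.Dict String Int :=
  PySem.Dict.ofList ((PySem.List.enumerate pvPreferred).map (fun p => (p.2, p.1)))

-- rank.get(v) as sort key; every sorted element is a key of rank, so the default is never used
def variable_order_alt (existing : List String) : List String :=
  let in_pref := PySem.List.sorted
      (PySem.Set.ofList (existing.filter (fun v => pvRank.contains v)))
      (fun v => pvRank.getD v 0) false
  let extras := existing.filter (fun v => !(pvRank.contains v))
  in_pref ++ extras

-- ===== PRECONDITION & SPEC =====
def Spec_variable_order (existing : List String) (out : List String) : Prop := out = variable_order_alt existing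
instance (existing : List String) (out : List String) : Decidable (Spec_variable_order existing out) := by unfold Spec_variable_order; infer_instance

-- ===== CLAIM (what is proved, stated in full; the proofs are below) =====
def Claim_equal_variable_order : Prop := ∀ (existing : List String), Dom_variable_order existing → Spec_variable_order existing (variable_order existing)

-- ===== LEMMAS AND PROOFS =====

theorem pvRank_keys : pvRank.keys = pvPreferred := by decide

theorem pvRank_contains (v : String) : pvRank.contains v = pvPreferred.contains v := by
  rw [PySem.Dict.contains_eq_decide_mem_keys, pvRank_keys]
  simp

theorem pvPreferred_pairwise :
    pvPreferred.Pairwise (fun a b => pvRank.getD a 0 < pvRank.getD b 0) := by decide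

theorem pvPreferred_nodup : pvPreferred.Nodup := by decide

theorem ordered_perm (existing : List String) :
    (pvPreferred.filter (fun v => PySem.Set.contains (PySem.Set.ofList existing) v)).Perm
      (PySem.Set.ofList (existing.filter (fun v => pvRank.contains v))) := by
  rw [List.perm_ext_iff_of_nodup (pvPreferred_nodup.filter _) (PySem.Set.nodup_ofList _)]
  intro a
  simp [PySem.Set.mem_ofList, List.mem_filter, pvRank_contains]
  tauto

theorem in_pref_eq (existing : List String) :
    PySem.List.sorted (PySem.Set.ofList (existing.filter (fun v => pvRank.contains v)))
        (fun v => pvRank.getD v 0) false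
      = pvPreferred.filter (fun v => PySem.Set.contains (PySem.Set.ofList existing) v) := by
  exact PySem.List.sorted_eq_of_perm_of_pairwise_lt _ _ _ (ordered_perm existing)
    (pvPreferred_pairwise.filter _)

theorem extras_eq (existing : List String) :
    existing.filter
        (fun v => !((pvPreferred.filter (fun u => PySem.Set.contains (PySem.Set.ofList existing) u)).contains v))
      = existing.filter (fun v => !(pvRank.contains v)) := by
  refine List.filter_congr ?_
  intro v hv
  have : (pvPreferred.filter (fun u => PySem.Set.contains (PySem.Set.ofList existing) u)).contains v
      = pvPreferred.contains v := by
    simp [List.mem_filter, PySem.Set.mem_ofList]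
    intro _; exact hv
  rw [this, pvRank_contains]

-- ===== VERDICT (by name: the statement is the Claim_ definition above) =====
theorem variable_order_spec : Claim_equal_variable_order := by
  intro existing _
  unfold Spec_variable_order variable_order variable_order_alt
  simp only
  rw [in_pref_eq, extras_eq]
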